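-- pv_equiv track=rewrite | github.com/vinayakvind/ams-simulator | test_regression.py | _parse_spice_elements
-- ===== SOURCE A (Python) =====
-- from typing import Any, Callable, Dict, List, Optional, Tuple
--
-- def _parse_spice_elements(netlist: str) -> Tuple[List[str], List[str], List[str]]:
--     """Return (elements, models, directives) from a SPICE netlist."""
--     elements, models, directives = [], [], []
--     for raw in netlist.splitlines():
--         line = raw.strip()
--         if not line or line.startswith("*"):
--             continue
--         if line.upper().startswith(".MODEL"):
--             models.append(line)
--         elif line.startswith("."):
--             directives.append(line)
--         else:
--             elements.append(line)
--     return elements, models, directives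
-- ===== SOURCE B (Python) =====
-- from typing import List, Tuple
--
-- def _parse_spice_elements(netlist: str) -> Tuple[List[str], List[str], List[str]]:
--     """Return (elements, models, directives) from a SPICE netlist.
--
--     Divide and conquer: recursively split the line list in halves, classify a
--     single line into a one-element triple, and merge sub-results by
--     concatenation (which preserves the original line order in each bucket).
--     """
--     def classify(raw: str) -> Tuple[List[str], List[str], List[str]]:
--         line = raw.strip()
--         if not line or line.startswith("*"):
--             return ([], [], [])
--         if line.upper().startswith(".MODEL"):
--             return ([], [line], [])
--         if line.startswith("."):
--             return ([], [], [line])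
--         return ([line], [], [])
--
--     def solve(lines: List[str]) -> Tuple[List[str], List[str], List[str]]:
--         if not lines:
--             return ([], [], [])
--         if len(lines) == 1:
--             return classify(lines[0])
--         mid = len(lines) // 2
--         e1, m1, d1 = solve(lines[:mid])
--         e2, m2, d2 = solve(lines[mid:])
--         return (e1 + e2, m1 + m2, d1 + d2)
--
--     return solve(netlist.splitlines())
-- ===== Notes on version B (the rewrite author's own statement) =====
-- stated objective: alternative
-- what changed: Replaces A's single left-to-right loop that appends into three mutable accumulators by a divide-and-conquer recursion: the line list is split in halves, a single line is classified into a one-element triple, and sub-triples are merged by concatenation, which preserves per-bucket order because the split respects the original order.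
import Mathlib
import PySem

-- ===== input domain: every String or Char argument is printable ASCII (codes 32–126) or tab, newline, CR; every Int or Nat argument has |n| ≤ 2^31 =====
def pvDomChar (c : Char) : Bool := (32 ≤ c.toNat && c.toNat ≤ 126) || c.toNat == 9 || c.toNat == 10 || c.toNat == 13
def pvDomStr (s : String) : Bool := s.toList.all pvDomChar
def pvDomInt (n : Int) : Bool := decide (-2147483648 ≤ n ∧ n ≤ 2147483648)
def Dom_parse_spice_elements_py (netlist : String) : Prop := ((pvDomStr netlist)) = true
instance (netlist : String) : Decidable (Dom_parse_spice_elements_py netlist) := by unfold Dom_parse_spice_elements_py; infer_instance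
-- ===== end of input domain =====

-- B replaces A's single left-to-right accumulator loop by a divide-and-conquer
-- recursion that splits the line list in halves and merges sub-triples by
-- concatenation (objective: alternative).

-- ===== PORT A =====
-- the for-loop of A: one pass, appending to one of the three accumulators per line
def pvLoopA (ls : List String) (acc : List String × List String × List String) :
    List String × List String × List String :=
  match ls with
  | [] => acc
  | raw :: rest =>
    let line := PySem.Str.strip raw
    if line == "" || PySem.Str.startswith line "*" then pvLoopA rest acc
    else if PySem.Str.startswith (PySem.Str.upper line) ".MODEL" then
      pvLoopA rest (acc.1, acc.2.1 ++ [line], acc.2.2)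
    else if PySem.Str.startswith line "." then
      pvLoopA rest (acc.1, acc.2.1, acc.2.2 ++ [line])
    else
      pvLoopA rest (acc.1 ++ [line], acc.2.1, acc.2.2)

def parse_spice_elements_py (netlist : String) : List String × List String × List String :=
  pvLoopA (PySem.Str.splitlines netlist) ([], [], [])

-- ===== PORT B =====
-- classify: one line into a one-element triple (Source B's inner `classify`)
def pvClassify (raw : String) : List String × List String × List String :=
  let line := PySem.Str.strip raw
  if line == "" || PySem.Str.startswith line "*" then ([], [], [])
  else if PySem.Str.startswith (PySem.Str.upper line) ".MODEL" then ([], [line], [])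
  else if PySem.Str.startswith line "." then ([], [], [line])
  else ([line], [], [])

-- solve: divide and conquer over the line list (Source B's inner `solve`)
def pvSolve (lines : List String) : List String × List String × List String :=
  match h : lines with
  | [] => ([], [], [])
  | [x] => pvClassify x
  | _ :: _ :: _ =>
    let mid := lines.length / 2
    let left := pvSolve (lines.take mid)
    let right := pvSolve (lines.drop mid)
    (left.1 ++ right.1, left.2.1 ++ right.2.1, left.2.2 ++ right.2.2)
termination_by lines.length
decreasing_by
  · simp [h]; omega
  · simp [h]; omega

def parse_spice_elements_py_alt (netlist : String) : List String × List String × List String :=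
  pvSolve (PySem.Str.splitlines netlist)

-- ===== PRECONDITION & SPEC =====
def Spec_parse_spice_elements_py (netlist : String) (out : List String × List String × List String) : Prop := out = parse_spice_elements_py_alt netlist
instance (netlist : String) (out : List String × List String × List String) : Decidable (Spec_parse_spice_elements_py netlist out) := by unfold Spec_parse_spice_elements_py; infer_instance

-- ===== CLAIM (what is proved, stated in full; the proofs are below) =====
def Claim_equal_parse_spice_elements_py : Prop := ∀ (netlist : String), Dom_parse_spice_elements_py netlist → Spec_parse_spice_elements_py netlist (parse_spice_elements_py netlist)

-- ===== LEMMAS AND PROOFS =====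

-- the common characterisation both ports are reduced to: the three filters of the cleaned lines
def pvSpecTriple (ls : List String) : List String × List String × List String :=
  let cleaned := (ls.map PySem.Str.strip).filter
    (fun l => !(l == "") && !PySem.Str.startswith l "*")
  (cleaned.filter (fun l => !PySem.Str.startswith l "."),
   cleaned.filter (fun l => PySem.Str.startswith (PySem.Str.upper l) ".MODEL"),
   cleaned.filter (fun l => PySem.Str.startswith l "." &&
                            !PySem.Str.startswith (PySem.Str.upper l) ".MODEL"))

-- upperChar maps only letters; anything mapped to '.' was already '.'
theorem pv_upperChar_dot (c : Char) (h : PySem.Chars.upperChar c = '.') : c = '.' := by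
  unfold PySem.Chars.upperChar at h
  split at h
  · exfalso; rename_i hl
    simp only [PySem.Chars.islower, Bool.and_eq_true, decide_eq_true_eq, Char.le_def,
      UInt32.le_iff_toNat_le] at hl
    have hv : c.toNat = c.val.toNat := rfl
    have ha : ('a').val.toNat = 97 := rfl
    have hz : ('z').val.toNat = 122 := rfl
    have h2 := congrArg Char.toNat h
    rw [Char.toNat_ofNat, if_pos (by unfold Nat.isValidChar; left; omega)] at h2
    have h3 : ('.' : Char).toNat = 46 := rfl
    omega
  · exact h

-- a line whose uppercasing starts with ".MODEL" already starts with "."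
theorem pv_model_starts_dot (l : String)
    (h : PySem.Str.startswith (PySem.Str.upper l) ".MODEL" = true) :
    PySem.Str.startswith l "." = true := by
  rw [PySem.Str.startswith_eq] at h ⊢
  rw [PySem.Chars.startswith_iff] at h ⊢
  rw [PySem.Str.toList_upper] at h
  unfold PySem.Chars.upper at h
  match hl : l.toList with
  | [] => rw [hl] at h; simp at h
  | c :: cs =>
    rw [hl] at h
    obtain ⟨t, ht⟩ := h
    simp only [List.map_cons] at ht
    have hc : PySem.Chars.upperChar c = '.' := by
      have := congrArg (fun xs => xs.head?) ht
      simpa using this.symm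
    exact ⟨cs, by simp [pv_upperChar_dot c hc]⟩

-- A's loop invariant: it appends exactly the three filters of the cleaned suffix
theorem pvLoopA_eq (ls : List String) (e m d : List String) :
    pvLoopA ls (e, m, d) =
      (e ++ (pvSpecTriple ls).1, m ++ (pvSpecTriple ls).2.1, d ++ (pvSpecTriple ls).2.2) := by
  induction ls generalizing e m d with
  | nil => simp [pvLoopA, pvSpecTriple]
  | cons raw rest ih =>
    simp only [pvLoopA, pvSpecTriple, List.map_cons, List.filter_cons]
    by_cases hskip : (PySem.Str.strip raw == "" || PySem.Str.startswith (PySem.Str.strip raw) "*") = true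
    · rw [if_pos hskip]
      have : (!(PySem.Str.strip raw == "") && !PySem.Str.startswith (PySem.Str.strip raw) "*") = false := by
        simp only [Bool.or_eq_true] at hskip
        rcases hskip with h | h
        · simp only [h, Bool.not_true, Bool.false_and]
        · simp only [h, Bool.not_true, Bool.and_false]
      rw [this]
      simp only [Bool.false_eq_true, if_false]
      exact ih e m d
    · rw [if_neg hskip]
      have hkeep : (!(PySem.Str.strip raw == "") && !PySem.Str.startswith (PySem.Str.strip raw) "*") = true := by
        simp only [Bool.or_eq_true, not_or, Bool.not_eq_true] at hskip
        simp only [hskip.1, hskip.2, Bool.not_false, Bool.and_self]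
      rw [hkeep]
      simp only [if_true, List.filter_cons]
      by_cases hM : PySem.Str.startswith (PySem.Str.upper (PySem.Str.strip raw)) ".MODEL" = true
      · have hD := pv_model_starts_dot _ hM
        rw [if_pos hM]
        simp only [hM, hD, Bool.not_true, Bool.and_false, Bool.false_eq_true, if_false, if_true]
        rw [ih]; simp [pvSpecTriple]
      · rw [if_neg hM]
        simp only [Bool.not_eq_true] at hM
        by_cases hD : PySem.Str.startswith (PySem.Str.strip raw) "." = true
        · rw [if_pos hD]
          simp only [hM, hD, Bool.not_false, Bool.and_true, Bool.not_true, Bool.false_eq_true,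
            if_false, if_true]
          rw [ih]; simp [pvSpecTriple]
        · rw [if_neg hD]
          simp only [Bool.not_eq_true] at hD
          simp only [hM, hD, Bool.not_false, Bool.false_and, Bool.false_eq_true, if_false, if_true]
          rw [ih]; simp [pvSpecTriple]

-- the filter characterisation distributes over append, so D&C merging is correct
theorem pvSpecTriple_append (a b : List String) :
    pvSpecTriple (a ++ b) =
      ((pvSpecTriple a).1 ++ (pvSpecTriple b).1,
       (pvSpecTriple a).2.1 ++ (pvSpecTriple b).2.1,
       (pvSpecTriple a).2.2 ++ (pvSpecTriple b).2.2) := by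
  simp [pvSpecTriple, List.filter_append]

-- pvClassify on one line agrees with the filter characterisation of the singleton
theorem pvClassify_eq (raw : String) : pvClassify raw = pvSpecTriple [raw] := by
  have h := pvLoopA_eq [raw] [] [] []
  simp only [List.nil_append] at h
  have h2 : pvLoopA [raw] ([], [], []) = pvClassify raw := by
    simp only [pvLoopA, pvClassify]
    split_ifs <;> rfl
  rw [← h2, h]

-- B's divide-and-conquer computes the filter characterisation
theorem pvSolve_eq (ls : List String) : pvSolve ls = pvSpecTriple ls := by
  induction ls using pvSolve.induct with
  | case1 => simp [pvSolve, pvSpecTriple]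
  | case2 x => rw [pvSolve]; exact pvClassify_eq x
  | case3 lines h1 h2 h3 ih1 ih2 =>
    rw [pvSolve]
    rw [ih1, ih2]
    rw [← pvSpecTriple_append, List.take_append_drop]

-- ===== VERDICT (by name: the statement is the Claim_ definition above) =====
theorem parse_spice_elements_py_spec : Claim_equal_parse_spice_elements_py := by
  intro netlist _
  unfold Spec_parse_spice_elements_py parse_spice_elements_py parse_spice_elements_py_alt
  rw [pvLoopA_eq, pvSolve_eq]
  simp
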